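-- pv_equiv track=rewrite | github.com/helland/Webscraper-and-book-analysis | webscraper_gutenberg/webscraper/analysis_functions.py | find_shortest_sentences
-- ===== SOURCE A (Python) =====
-- def split_text_by_sentences(text, separators):
--     sentences = []
--     current_sentence = []
--
--     for word in text:
--         if word in separators:                          # if the current word is a sentence breaker
--             if current_sentence:
--                 current_sentence.append(int(word))      # add the separator to end the sentence
--                 sentences.append(current_sentence)      # add sentence to list of sentences
--             current_sentence = []                       # reset sentence
--         else:
--             current_sentence.append(int(word))          # otherwise, add the word to the sentence
--
--     if current_sentence:
--         sentences.append(current_sentence)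
--     return sentences
--
-- def find_shortest_sentences(text, separators):
--     sentences = split_text_by_sentences(text, separators)
--
--     valid_sentences = [sentence for sentence in sentences if len(sentence) > 1]
--     if not valid_sentences:
--         return []
--
--     shortest_sentence_length = min(len(sentence) for sentence in valid_sentences)
--     shortest_sentences = [sentence for sentence in valid_sentences if len(sentence) == shortest_sentence_length]
--     return shortest_sentences
-- ===== SOURCE B (Python) =====
-- def find_shortest_sentences(text, separators):
--     # Single pass: group tokens into sentences and fold min-finding + collection
--     # into the same traversal.
--     cur = []
--     best_len = None
--     result = []
--
--     def finish(sentence):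
--         nonlocal best_len, result
--         n = len(sentence)
--         if n > 1:
--             if best_len is None or n < best_len:
--                 best_len = n
--                 result = [sentence]
--             elif n == best_len:
--                 result.append(sentence)
--
--     for word in text:
--         if word in separators:
--             if cur:
--                 cur.append(int(word))
--                 finish(cur)
--             cur = []
--         else:
--             cur.append(int(word))
--
--     if cur:
--         finish(cur)
--     return result
-- ===== Notes on version B (the rewrite author's own statement) =====
-- stated objective: alternative
-- what changed: A splits the whole text into a sentence list, then filters valid sentences, computes the minimum length, and filters again; B is one fused pass over the token stream maintaining the current sentence, the running best length and the running result list, finalizing each sentence as it closes. Pre_ excludes only inputs on which A raises ValueError (int() on a non-parseable token); B raises there identically.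
import Mathlib
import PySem

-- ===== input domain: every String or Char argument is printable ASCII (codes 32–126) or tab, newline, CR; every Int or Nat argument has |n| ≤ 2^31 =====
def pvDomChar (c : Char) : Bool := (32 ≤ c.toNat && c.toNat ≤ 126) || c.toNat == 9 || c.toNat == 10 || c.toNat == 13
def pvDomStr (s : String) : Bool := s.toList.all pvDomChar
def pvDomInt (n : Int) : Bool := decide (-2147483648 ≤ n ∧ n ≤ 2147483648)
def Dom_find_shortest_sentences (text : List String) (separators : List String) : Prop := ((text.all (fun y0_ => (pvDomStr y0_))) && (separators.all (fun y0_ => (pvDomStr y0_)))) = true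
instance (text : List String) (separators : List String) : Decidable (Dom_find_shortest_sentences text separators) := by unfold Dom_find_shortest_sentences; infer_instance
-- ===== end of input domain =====

-- B fuses A's split → filter → min → filter pipeline into one pass over the token
-- stream that finalizes each sentence as it closes against a running best length.

-- int(word); Python raises ValueError where ofStr? is none — such inputs are excluded by Pre_,
-- there we substitute 0 (never reached inside Pre_).
def pyInt (w : String) : Int := (PySem.Int.ofStr? w).getD 0

-- ===== PORT A =====
-- loop body of split_text_by_sentences: state = (sentences, current_sentence)
def stepA (separators : List String) (st : List (List Int) × List Int) (word : String) : List (List Int) × List Int :=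
  if separators.contains word then
    if st.2 ≠ [] then (st.1 ++ [st.2 ++ [pyInt word]], []) else (st.1, [])
  else (st.1, st.2 ++ [pyInt word])

def split_text_by_sentences (text : List String) (separators : List String) : List (List Int) :=
  let p := text.foldl (stepA separators) ([], [])
  if p.2 ≠ [] then p.1 ++ [p.2] else p.1

def find_shortest_sentences (text : List String) (separators : List String) : List (List Int) :=
  let sentences := split_text_by_sentences text separators
  let valid_sentences := sentences.filter (fun s => decide (1 < s.length))
  if valid_sentences = [] then []
  else
    match PySem.List.min? (valid_sentences.map List.length) (fun y => y) with
    | none => []   -- unreachable: valid_sentences ≠ []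
    | some m => valid_sentences.filter (fun s => decide (s.length = m))

-- ===== PORT B =====
-- finish(sentence): fold a completed sentence into (best_len, result)
def bFinish (s : List Int) (st : Option Nat × List (List Int)) : Option Nat × List (List Int) :=
  if 1 < s.length then
    match st.1 with
    | none => (some s.length, [s])
    | some b =>
      if s.length < b then (some s.length, [s])
      else if s.length = b then (st.1, st.2 ++ [s])
      else st
  else st

-- loop body of B: state = (cur, (best_len, result))
def stepB (separators : List String) (st : List Int × Option Nat × List (List Int)) (word : String) : List Int × Option Nat × List (List Int) :=
  if separators.contains word then
    if st.1 ≠ [] then ([], bFinish (st.1 ++ [pyInt word]) st.2) else ([], st.2)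
  else (st.1 ++ [pyInt word], st.2)

def find_shortest_sentences_alt (text : List String) (separators : List String) : List (List Int) :=
  let p := text.foldl (stepB separators) ([], none, [])
  let st := if p.1 ≠ [] then bFinish p.1 p.2 else p.2
  st.2

-- ===== PRECONDITION & SPEC =====
-- Pre_ excludes exactly the inputs on which Python A raises ValueError: int() is applied to every
-- non-separator token and to every separator token immediately preceded by a non-separator token
-- (those close a non-empty sentence); Pre_ requires all of those to be int-parseable.
def Pre_find_shortest_sentences (text : List String) (separators : List String) : Prop :=
  (∀ w ∈ text, w ∉ separators → (PySem.Int.ofStr? w).isSome = true) ∧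
  (∀ p ∈ text.zip text.tail, p.1 ∉ separators → p.2 ∈ separators → (PySem.Int.ofStr? p.2).isSome = true)
instance (text : List String) (separators : List String) : Decidable (Pre_find_shortest_sentences text separators) := by unfold Pre_find_shortest_sentences; infer_instance

def pvWitness_find_shortest_sentences : List String × List String := (["1", "2", "0", "3"], ["0"])

def Spec_find_shortest_sentences (text : List String) (separators : List String) (out : List (List Int)) : Prop := out = find_shortest_sentences_alt text separators
instance (text : List String) (separators : List String) (out : List (List Int)) : Decidable (Spec_find_shortest_sentences text separators out) := by unfold Spec_find_shortest_sentences; infer_instance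

-- ===== CLAIM (what is proved, stated in full; the proofs are below) =====
def Claim_equal_find_shortest_sentences : Prop := ∀ (text : List String) (separators : List String), Dom_find_shortest_sentences text separators → Pre_find_shortest_sentences text separators → Spec_find_shortest_sentences text separators (find_shortest_sentences text separators)

-- ===== LEMMAS AND PROOFS =====

-- sentence splitting, written as a structural recursion (proof-side view of both loops)
def splitRec (separators : List String) : List String → List Int → List (List Int)
  | [], cur => if cur = [] then [] else [cur]
  | w :: ws, cur =>
    if separators.contains w then
      if cur = [] then splitRec separators ws []
      else (cur ++ [pyInt w]) :: splitRec separators ws []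
    else splitRec separators ws (cur ++ [pyInt w])

-- A's split loop computes acc ++ splitRec
lemma splitA_eq (separators : List String) : ∀ (ws : List String) (acc : List (List Int)) (cur : List Int),
    (let p := ws.foldl (stepA separators) (acc, cur);
     if p.2 ≠ [] then p.1 ++ [p.2] else p.1) = acc ++ splitRec separators ws cur := by
  intro ws
  induction ws with
  | nil => intro acc cur; by_cases h : cur = [] <;> simp [splitRec, h]
  | cons w ws ih =>
    intro acc cur
    by_cases hs : w ∈ separators
    · by_cases hc : cur = []
      · simpa [stepA, splitRec, hs, hc] using ih acc []
      · simpa [stepA, splitRec, hs, hc] using ih (acc ++ [cur ++ [pyInt w]]) []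
    · simpa [stepA, splitRec, hs] using ih acc (cur ++ [pyInt w])

-- B's token loop is bFinish folded over the sentences splitRec produces
lemma groupB_eq (separators : List String) : ∀ (ws : List String) (cur : List Int) (st : Option Nat × List (List Int)),
    (let p := ws.foldl (stepB separators) (cur, st);
     if p.1 ≠ [] then bFinish p.1 p.2 else p.2)
      = (splitRec separators ws cur).foldl (fun st s => bFinish s st) st := by
  intro ws
  induction ws with
  | nil => intro cur st; by_cases h : cur = [] <;> simp [splitRec, h]
  | cons w ws ih =>
    intro cur st
    by_cases hs : w ∈ separators
    · by_cases hc : cur = []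
      · simpa [stepB, splitRec, hs, hc] using ih [] st
      · simpa [stepB, splitRec, hs, hc] using ih [] (bFinish (cur ++ [pyInt w]) st)
    · simpa [stepB, splitRec, hs] using ih (cur ++ [pyInt w]) st

lemma bFinish_skip (s : List Int) (st : Option Nat × List (List Int)) (h : ¬ 1 < s.length) :
    bFinish s st = st := by simp [bFinish, h]

-- folding bFinish only looks at the valid sentences
lemma foldl_bFinish_filter : ∀ (ss : List (List Int)) (st : Option Nat × List (List Int)),
    ss.foldl (fun st s => bFinish s st) st
      = (ss.filter (fun s => decide (1 < s.length))).foldl (fun st s => bFinish s st) st := by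
  intro ss
  induction ss with
  | nil => intro st; rfl
  | cons s ss ih =>
    intro st
    by_cases h : 1 < s.length
    · simp [h, ih]
    · simp [h, bFinish_skip s st h, ih]

lemma foldl_min_le (l : List (List Int)) : ∀ b : Nat, l.foldl (fun a s => min a s.length) b ≤ b := by
  induction l with
  | nil => intro b; simp
  | cons s l ih =>
    intro b
    calc (s :: l).foldl (fun a s => min a s.length) b
        = l.foldl (fun a s => min a s.length) (min b s.length) := rfl
      _ ≤ min b s.length := ih _
      _ ≤ b := min_le_left _ _

-- characterization of folding bFinish over valid sentences from a committed best
lemma gchar : ∀ (vs : List (List Int)) (b : Nat) (res : List (List Int)),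
    (∀ s ∈ vs, 1 < s.length) →
    vs.foldl (fun st s => bFinish s st) (some b, res)
      = (some (vs.foldl (fun a s => min a s.length) b),
         (if vs.foldl (fun a s => min a s.length) b = b then res else [])
           ++ vs.filter (fun s => decide (s.length = vs.foldl (fun a s => min a s.length) b))) := by
  intro vs
  induction vs with
  | nil => intro b res _; simp
  | cons v vs ih =>
    intro b res hval
    have hv : 1 < v.length := hval v (by simp)
    have hval' : ∀ s ∈ vs, 1 < s.length := fun s hs => hval s (by simp [hs])
    have hle : ∀ c : Nat, vs.foldl (fun a s => min a s.length) c ≤ c := foldl_min_le vs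
    simp only [List.foldl_cons]
    rcases lt_trichotomy v.length b with hlt | heq | hgt
    · have hb : bFinish v (some b, res) = (some v.length, [v]) := by
        simp [bFinish, hv, hlt]
      rw [hb, ih v.length [v] hval']
      have hmin : min b v.length = v.length := by omega
      have hM : vs.foldl (fun a s => min a s.length) v.length ≤ v.length := hle _
      refine Prod.ext ?_ ?_
      · simp [hmin]
      · have hMb : vs.foldl (fun a s => min a s.length) v.length ≠ b := by omega
        simp only [hmin, List.filter_cons]
        rw [if_neg hMb]
        by_cases h : vs.foldl (fun a s => min a s.length) v.length = v.length
        · simp only [h]; simp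
        · have h2 : ¬ (v.length = vs.foldl (fun a s => min a s.length) v.length) := fun e => h e.symm
          simp [h, h2]
    · have hb : bFinish v (some b, res) = (some b, res ++ [v]) := by
        have h1 : ¬ v.length < b := by omega
        have hvb : 1 < b := heq ▸ hv
        simp [bFinish, hvb, heq]
      rw [hb, ih b (res ++ [v]) hval']
      have hmin : min b v.length = b := by omega
      refine Prod.ext ?_ ?_
      · simp [hmin]
      · simp only [hmin, List.filter_cons]
        by_cases h : vs.foldl (fun a s => min a s.length) b = b
        · have h2 : v.length = vs.foldl (fun a s => min a s.length) b := by omega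
          simp [h, h2]
        · have h2 : ¬ (v.length = vs.foldl (fun a s => min a s.length) b) := by omega
          simp [h, h2]
    · have hb : bFinish v (some b, res) = (some b, res) := by
        have h1 : ¬ v.length < b := by omega
        have h2 : ¬ v.length = b := by omega
        simp [bFinish, hv, h1, h2]
      rw [hb, ih b res hval']
      have hmin : min b v.length = b := by omega
      refine Prod.ext ?_ ?_
      · simp [hmin]
      · have hM : vs.foldl (fun a s => min a s.length) b ≤ b := hle _
        have h2 : ¬ (v.length = vs.foldl (fun a s => min a s.length) b) := by omega
        simp [hmin, h2]

-- A's select pipeline equals the bFinish fold over the same sentence list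
lemma select_eq_valid : ∀ (vs : List (List Int)), (∀ s ∈ vs, 1 < s.length) →
    (if vs = [] then []
     else
       match PySem.List.min? (vs.map List.length) (fun y => y) with
       | none => []
       | some m => vs.filter (fun s => decide (s.length = m)))
      = (vs.foldl (fun st s => bFinish s st) ((none : Option Nat), ([] : List (List Int)))).2 := by
  intro vs hval
  cases vs with
  | nil => simp
  | cons v t =>
    have hv : 1 < v.length := hval v (by simp)
    have hval' : ∀ s ∈ t, 1 < s.length := fun s hs => hval s (by simp [hs])
    have hstep : bFinish v ((none : Option Nat), ([] : List (List Int))) = (some v.length, [v]) := by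
      simp [bFinish, hv]
    have hmap : (t.map List.length).foldl min v.length
        = t.foldl (fun a s => min a s.length) v.length := by
      rw [List.foldl_map]
    rw [if_neg (by simp : ¬ (v :: t = [])), List.foldl_cons, hstep,
        gchar t v.length [v] hval', List.map_cons, PySem.List.min?_id_cons, hmap]
    simp only [List.filter_cons]
    by_cases h : t.foldl (fun a s => min a s.length) v.length = v.length
    · simp only [h]; simp
    · have h2 : ¬ (v.length = t.foldl (fun a s => min a s.length) v.length) := fun e => h e.symm
      simp [h, h2]

-- ===== VERDICT (by name: the statement is the Claim_ definition above) =====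
theorem find_shortest_sentences_spec : Claim_equal_find_shortest_sentences := by
  intro text separators _ _
  show find_shortest_sentences text separators = find_shortest_sentences_alt text separators
  have hsplit : split_text_by_sentences text separators = splitRec separators text [] := by
    simpa [split_text_by_sentences] using splitA_eq separators text [] []
  have hval : ∀ s ∈ (splitRec separators text []).filter (fun s => decide (1 < s.length)),
      1 < s.length := by
    intro s hs
    simpa using (List.mem_filter.mp hs).2
  have hB : find_shortest_sentences_alt text separators
      = ((splitRec separators text []).foldl (fun st s => bFinish s st)
          ((none : Option Nat), ([] : List (List Int)))).2 := by
    have h := groupB_eq separators text [] ((none : Option Nat), ([] : List (List Int)))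
    simp only [find_shortest_sentences_alt]
    simp only at h
    rw [h]
  rw [hB, foldl_bFinish_filter]
  simp only [find_shortest_sentences, hsplit]
  exact select_eq_valid _ hval
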